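-- pv_equiv track=rewrite | github.com/hayden000/FinalYearProject | counting.py | atLeast
-- ===== SOURCE A (Python) =====
-- def atLeast(jobGroups, atLeastCount, atLeastList):
--     """
--     A constraint checker that checks the min counting constraint
--     args
--         jobGroups (list): a possible plan being checked
--         atLeastCount (int): the min number of users allowed to be assigned to group
--         atLeastList (list): the list of jobs subject to the constraint
--     returns
--         boolean: true iff the condition is met
--     """
--     assignments = []
--     for i in atLeastList:
--         for j, group in enumerate(jobGroups):
--             if i in group:
--                 assignments.append(j)
--                 break
--     if len(set(assignments)) >= atLeastCount:
--         return True
--     return False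
-- ===== SOURCE B (Python) =====
-- def atLeast(jobGroups, atLeastCount, atLeastList):
--     first = {}
--     for j, group in enumerate(jobGroups):
--         for x in group:
--             first.setdefault(x, j)
--     groups = set()
--     for i in atLeastList:
--         if i in first:
--             groups.add(first[i])
--     return len(groups) >= atLeastCount
-- ===== Notes on version B (the rewrite author's own statement) =====
-- stated objective: faster
-- what changed: Replaces the per-job linear scan over all groups with a dict mapping each element to its first group's index, built once, so each job in atLeastList is resolved by one O(1) lookup.
import Mathlib
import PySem

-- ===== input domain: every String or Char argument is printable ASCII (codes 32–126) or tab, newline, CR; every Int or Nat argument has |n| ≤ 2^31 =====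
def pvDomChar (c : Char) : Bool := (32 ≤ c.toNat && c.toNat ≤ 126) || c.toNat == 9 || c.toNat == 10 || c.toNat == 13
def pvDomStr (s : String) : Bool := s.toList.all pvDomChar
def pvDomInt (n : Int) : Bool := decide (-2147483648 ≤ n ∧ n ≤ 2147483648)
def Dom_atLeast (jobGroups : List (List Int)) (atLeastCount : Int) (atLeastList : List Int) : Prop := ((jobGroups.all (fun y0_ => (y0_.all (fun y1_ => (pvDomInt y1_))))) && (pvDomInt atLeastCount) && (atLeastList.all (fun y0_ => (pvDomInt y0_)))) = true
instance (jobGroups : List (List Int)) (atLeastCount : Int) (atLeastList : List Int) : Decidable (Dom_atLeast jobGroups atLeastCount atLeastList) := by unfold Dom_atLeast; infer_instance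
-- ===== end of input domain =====

-- B replaces A's per-job linear scan over all groups with an element→first-group-index
-- dict built once, then O(1) lookups (objective: faster, asymptotic).

-- ===== PORT A =====
-- inner 'for j, group in enumerate(jobGroups): if i in group: assignments.append(j); break'
def atLeastInner (i : Int) : List (Int × List Int) → List Int → List Int
  | [], acc => acc
  | (j, group) :: rest, acc =>
      if group.contains i then acc ++ [j] else atLeastInner i rest acc

def atLeast (jobGroups : List (List Int)) (atLeastCount : Int) (atLeastList : List Int) : Bool :=
  let assignments :=
    atLeastList.foldl (fun acc i => atLeastInner i (PySem.List.enumerate jobGroups) acc) []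
  if ((PySem.Set.ofList assignments).length : Int) ≥ atLeastCount then true else false

-- ===== PORT B =====
-- first = {}; for j, group in enumerate(jobGroups): for x in group: first.setdefault(x, j)
def atLeastFirst (jobGroups : List (List Int)) : PySem.Dict Int Int :=
  (PySem.List.enumerate jobGroups).foldl
    (fun d p => p.2.foldl (fun d x => d.setdefault x p.1) d) PySem.Dict.empty

def atLeast_alt (jobGroups : List (List Int)) (atLeastCount : Int) (atLeastList : List Int) : Bool :=
  let first := atLeastFirst jobGroups
  let groups :=
    atLeastList.foldl (fun s i =>
      match first.get? i with
      | some j => PySem.Set.add s j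
      | none => s) PySem.Set.empty
  decide (((groups.length : Nat) : Int) ≥ atLeastCount)

-- ===== PRECONDITION & SPEC =====
def Spec_atLeast (jobGroups : List (List Int)) (atLeastCount : Int) (atLeastList : List Int) (out : Bool) : Prop := out = atLeast_alt jobGroups atLeastCount atLeastList
instance (jobGroups : List (List Int)) (atLeastCount : Int) (atLeastList : List Int) (out : Bool) : Decidable (Spec_atLeast jobGroups atLeastCount atLeastList out) := by unfold Spec_atLeast; infer_instance

-- ===== CLAIM (what is proved, stated in full; the proofs are below) =====
def Claim_equal_atLeast : Prop := ∀ (jobGroups : List (List Int)) (atLeastCount : Int) (atLeastList : List Int), Dom_atLeast jobGroups atLeastCount atLeastList → Spec_atLeast jobGroups atLeastCount atLeastList (atLeast jobGroups atLeastCount atLeastList)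

-- ===== LEMMAS AND PROOFS =====

-- the Option-valued "first group index containing i" that both programs compute
def scanFirst : List (Int × List Int) → Int → Option Int
  | [], _ => none
  | (j, g) :: rest, i => if i ∈ g then some j else scanFirst rest i

theorem atLeastInner_eq (i : Int) (L : List (Int × List Int)) (acc : List Int) :
    atLeastInner i L acc = acc ++ (scanFirst L i).toList := by
  induction L generalizing acc with
  | nil => simp [atLeastInner, scanFirst]
  | cons p rest ih =>
      obtain ⟨j, g⟩ := p
      by_cases h : i ∈ g <;> simp [atLeastInner, scanFirst, h, ih]

theorem group_fold_get? (g : List Int) (j : Int) (d : PySem.Dict Int Int) (x : Int) :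
    (g.foldl (fun d y => d.setdefault y j) d).get? x
      = (d.get? x).or (if x ∈ g then some j else none) := by
  induction g generalizing d with
  | nil => simp
  | cons y g ih =>
      simp only [List.foldl_cons, ih]
      by_cases hxy : x = y
      · subst hxy
        rw [PySem.Dict.get?_setdefault_self]
        cases h : d.get? x <;> simp [Option.or]
      · rw [PySem.Dict.get?_setdefault_of_ne d j hxy]
        by_cases hg : x ∈ g <;> simp [List.mem_cons, hxy, hg]

theorem dict_fold_get? (L : List (Int × List Int)) (d : PySem.Dict Int Int) (x : Int) :
    (L.foldl (fun d p => p.2.foldl (fun d y => d.setdefault y p.1) d) d).get? x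
      = (d.get? x).or (scanFirst L x) := by
  induction L generalizing d with
  | nil => simp [scanFirst]
  | cons p rest ih =>
      obtain ⟨j, g⟩ := p
      simp only [List.foldl_cons, ih, group_fold_get?, scanFirst]
      by_cases hg : x ∈ g <;> cases h : d.get? x <;> simp [hg, Option.or]

theorem atLeastFirst_get? (jobGroups : List (List Int)) (x : Int) :
    (atLeastFirst jobGroups).get? x = scanFirst (PySem.List.enumerate jobGroups) x := by
  simp [atLeastFirst, dict_fold_get?, PySem.Dict.get?_empty, Option.or]

theorem groups_fold_eq (F : Int → Option Int) (l : List Int) (s : PySem.Set Int) :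
    l.foldl (fun s i => match F i with
      | some j => PySem.Set.add s j
      | none => s) s
      = (l.flatMap (fun i => (F i).toList)).foldl PySem.Set.add s := by
  induction l generalizing s with
  | nil => simp
  | cons i l ih =>
      cases h : F i <;> simp [h, ih]

theorem atLeast_spec' (jobGroups : List (List Int)) (atLeastCount : Int) (atLeastList : List Int) :
    atLeast jobGroups atLeastCount atLeastList = atLeast_alt jobGroups atLeastCount atLeastList := by
  have hA : atLeastList.foldl
      (fun acc i => atLeastInner i (PySem.List.enumerate jobGroups) acc) []
      = atLeastList.flatMap (fun i => (scanFirst (PySem.List.enumerate jobGroups) i).toList) := by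
    have := PySem.List.foldl_append_eq_flatMap
      (g := fun i => (scanFirst (PySem.List.enumerate jobGroups) i).toList)
      (l := atLeastList) (acc := ([] : List Int))
    simpa [atLeastInner_eq] using this
  have hB : atLeastList.foldl (fun s i =>
      match (atLeastFirst jobGroups).get? i with
      | some j => PySem.Set.add s j
      | none => s) PySem.Set.empty
      = PySem.Set.ofList
          (atLeastList.flatMap (fun i => (scanFirst (PySem.List.enumerate jobGroups) i).toList)) := by
    rw [PySem.Set.ofList_eq_foldl]
    simpa [atLeastFirst_get?] using
      groups_fold_eq (F := fun i => scanFirst (PySem.List.enumerate jobGroups) i)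
        (l := atLeastList) (s := PySem.Set.empty)
  unfold atLeast atLeast_alt
  simp only []
  rw [hA, hB]
  by_cases h : ((PySem.Set.ofList (atLeastList.flatMap
      (fun i => (scanFirst (PySem.List.enumerate jobGroups) i).toList))).length : Int) ≥ atLeastCount <;>
    simp [h]

-- ===== VERDICT (by name: the statement is the Claim_ definition above) =====
theorem atLeast_spec : Claim_equal_atLeast := by
  intro jobGroups atLeastCount atLeastList _
  unfold Spec_atLeast
  exact atLeast_spec' jobGroups atLeastCount atLeastList
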